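-- pv_equiv track=rewrite | github.com/ilyas1974/staticsite | src/split_blocks.py | split_blocks
-- ===== SOURCE A (Python) =====
-- def split_blocks(markdown: str) -> list[str]:
--     lines = markdown.split('\n')
--     blocks = []
--     current_block = []
--
--     for line in lines:
--         # Trim any trailing spaces to normalize
--         line = line.rstrip()
--
--         if line == "":
--             if current_block:
--                 blocks.append('\n'.join(current_block))
--                 current_block = []
--         else:
--             current_block.append(line)
--
--     # Add last block if it exists
--     if current_block:
--         blocks.append('\n'.join(current_block))
--
--     return blocks
-- ===== SOURCE B (Python) =====
-- def split_blocks(markdown: str) -> list[str]: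
--     # Two-pointer scan over pre-normalized lines: skip blank lines, then take
--     # the whole run of non-blank lines at once as a block (no running buffer).
--     lines = [l.rstrip() for l in markdown.split('\n')]
--     blocks = []
--     i, n = 0, len(lines)
--     while i < n:
--         if lines[i] == '':
--             i += 1
--         else:
--             j = i + 1
--             while j < n and lines[j] != '':
--                 j += 1
--             blocks.append('\n'.join(lines[i:j]))
--             i = j
--     return blocks
-- ===== Notes on version B (the rewrite author's own statement) =====
-- stated objective: alternative
-- what changed: Replaces A's line-by-line accumulator with flush-on-blank logic by a two-pointer scan over pre-normalized lines that skips blank lines and emits each maximal non-blank run as one block via a single slice+join.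
import Mathlib
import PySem

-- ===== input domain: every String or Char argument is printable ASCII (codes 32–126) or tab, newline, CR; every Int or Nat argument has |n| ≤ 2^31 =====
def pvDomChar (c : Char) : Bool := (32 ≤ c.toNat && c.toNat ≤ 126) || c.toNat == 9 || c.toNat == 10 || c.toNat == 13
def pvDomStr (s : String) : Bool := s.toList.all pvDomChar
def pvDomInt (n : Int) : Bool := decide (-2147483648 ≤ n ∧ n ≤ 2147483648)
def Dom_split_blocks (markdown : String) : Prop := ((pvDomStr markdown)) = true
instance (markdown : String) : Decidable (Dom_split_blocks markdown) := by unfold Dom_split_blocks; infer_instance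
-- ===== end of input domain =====

-- B replaces A's line-by-line accumulator/flush loop with a two-pointer scan that
-- emits each maximal run of non-blank (rstripped) lines as one block; same values, alternative decomposition.

-- ===== PORT A =====
-- one loop step of A: (blocks, current_block) updated by one raw line
def split_blocks_stepA (st : List String × List String) (line : String) : List String × List String :=
  let l := PySem.Str.rstrip line
  if l == "" then
    if st.2.isEmpty then st else (st.1 ++ [PySem.Str.join "\n" st.2], [])
  else
    (st.1, st.2 ++ [l])

def split_blocks (markdown : String) : List String :=
  -- split? is none only for an empty separator, impossible for the literal "\n"
  let lines := (PySem.Str.split? markdown "\n").getD []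
  let st := lines.foldl split_blocks_stepA ([], [])
  if st.2.isEmpty then st.1 else st.1 ++ [PySem.Str.join "\n" st.2]

-- ===== PORT B =====
-- B's outer while-loop: each call handles one index position i — skip a blank line,
-- or take the whole run of non-blank lines (j = end of run) and append it to blocks.
def split_blocks_goB (ls : List String) (blocks : List String) : List String :=
  match ls with
  | [] => blocks
  | l :: rest =>
    if l == "" then
      split_blocks_goB rest blocks
    else
      split_blocks_goB (rest.dropWhile (fun s => !(s == "")))
        (blocks ++ [PySem.Str.join "\n" (l :: rest.takeWhile (fun s => !(s == "")))])
termination_by ls.length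
decreasing_by
  · simp
  · simpa using Nat.lt_succ_of_le (List.length_dropWhile_le _ _)

def split_blocks_alt (markdown : String) : List String :=
  split_blocks_goB (((PySem.Str.split? markdown "\n").getD []).map PySem.Str.rstrip) []

-- ===== PRECONDITION & SPEC =====
def Spec_split_blocks (markdown : String) (out : List String) : Prop := out = split_blocks_alt markdown
instance (markdown : String) (out : List String) : Decidable (Spec_split_blocks markdown out) := by unfold Spec_split_blocks; infer_instance

-- ===== CLAIM (what is proved, stated in full; the proofs are below) =====
def Claim_equal_split_blocks : Prop := ∀ (markdown : String), Dom_split_blocks markdown → Spec_split_blocks markdown (split_blocks markdown)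

-- ===== LEMMAS AND PROOFS =====

-- the pure step on an already-rstripped line
def split_blocks_stepP (st : List String × List String) (l : String) : List String × List String :=
  if l == "" then
    if st.2.isEmpty then st else (st.1 ++ [PySem.Str.join "\n" st.2], [])
  else
    (st.1, st.2 ++ [l])

-- main invariant: A's fold (with final flush) equals B's run-taking recursion
lemma fold_eq_goB (ls : List String) (b c : List String) :
    (let st := ls.foldl split_blocks_stepP (b, c)
     if st.2.isEmpty then st.1 else st.1 ++ [PySem.Str.join "\n" st.2]) =
      (if c.isEmpty then split_blocks_goB ls b
       else split_blocks_goB (ls.dropWhile (fun s => !(s == "")))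
              (b ++ [PySem.Str.join "\n" (c ++ ls.takeWhile (fun s => !(s == "")))])) := by
  induction ls generalizing b c with
  | nil =>
    cases c with
    | nil => simp [split_blocks_goB]
    | cons x xs => simp [split_blocks_goB]
  | cons l ls ih =>
    by_cases hl : l = ""
    · subst hl
      cases c with
      | nil =>
        simpa [split_blocks_stepP, split_blocks_goB] using ih b []
      | cons x xs =>
        have := ih (b ++ [PySem.Str.join "\n" (x :: xs)]) []
        simpa [split_blocks_stepP, split_blocks_goB] using this
    · cases c with
      | nil =>
        have := ih b [l]
        simpa [split_blocks_stepP, split_blocks_goB, hl] using this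
      | cons x xs =>
        have := ih b (x :: xs ++ [l])
        simpa [split_blocks_stepP, hl, List.append_assoc] using this

-- ===== VERDICT (by name: the statement is the Claim_ definition above) =====
theorem split_blocks_spec : Claim_equal_split_blocks := by
  intro markdown _
  unfold Spec_split_blocks split_blocks split_blocks_alt
  have hmap : ((PySem.Str.split? markdown "\n").getD []).foldl split_blocks_stepA ([], []) =
      (((PySem.Str.split? markdown "\n").getD []).map PySem.Str.rstrip).foldl split_blocks_stepP ([], []) := by
    rw [List.foldl_map]; rfl
  simp only [hmap]
  have := fold_eq_goB (((PySem.Str.split? markdown "\n").getD []).map PySem.Str.rstrip) [] []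
  simpa using this
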